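-- pv_equiv track=rewrite | github.com/oriolf/adventofcode-2025 | d9/solve.py | points_check_edge
-- ===== SOURCE A (Python) =====
-- def points_between(p1, p2):
--     if p1[0] == p2[0]:
--         low, high = min(p1[1], p2[1]), max(p1[1], p2[1])
--         for i in range(low, high + 1):
--             yield (p1[0], i)
--
--     if p1[1] == p2[1]:
--         low, high = min(p1[0], p2[0]), max(p1[0], p2[0])
--         for i in range(low, high + 1):
--             yield (i, p1[1])
--
-- def points_check_edge(p1, p2, edges):
--     on_edge = True
--     points = list(points_between(p1, p2))
--     for p in points:
--         if p not in edges and on_edge: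
--             yield p
--             on_edge = False
--         elif p in edges and not on_edge:
--             on_edge = True
--     on_edge = True
--     for p in points[::-1]:
--         if p not in edges and on_edge:
--             yield p
--             on_edge = False
--         elif p in edges and not on_edge:
--             on_edge = True
-- ===== SOURCE B (Python) =====
-- def points_check_edge(p1, p2, edges):
--     points = []
--     if p1[0] == p2[0]:
--         lo, hi = min(p1[1], p2[1]), max(p1[1], p2[1])
--         for i in range(lo, hi + 1):
--             points.append((p1[0], i))
--     if p1[1] == p2[1]:
--         lo, hi = min(p1[0], p2[0]), max(p1[0], p2[0])
--         for i in range(lo, hi + 1):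
--             points.append((i, p1[1]))
--     # one pass: group consecutive non-edge points into maximal runs (start, end)
--     runs = []
--     cur = None
--     for p in points:
--         if p in edges:
--             if cur is not None:
--                 runs.append(cur)
--                 cur = None
--         elif cur is None:
--             cur = (p, p)
--         else:
--             cur = (cur[0], p)
--     if cur is not None:
--         runs.append(cur)
--     for s, _ in runs:
--         yield s
--     for _, e in reversed(runs):
--         yield e
-- ===== Notes on version B (the rewrite author's own statement) =====
-- stated objective: alternative
-- what changed: Replaces A's two stateful toggling scans (forward and over the reversed list) by one grouping pass that collects each maximal non-edge run as a (start, end) pair, then emits run starts forward and run ends from the reversed run list.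
import Mathlib
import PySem

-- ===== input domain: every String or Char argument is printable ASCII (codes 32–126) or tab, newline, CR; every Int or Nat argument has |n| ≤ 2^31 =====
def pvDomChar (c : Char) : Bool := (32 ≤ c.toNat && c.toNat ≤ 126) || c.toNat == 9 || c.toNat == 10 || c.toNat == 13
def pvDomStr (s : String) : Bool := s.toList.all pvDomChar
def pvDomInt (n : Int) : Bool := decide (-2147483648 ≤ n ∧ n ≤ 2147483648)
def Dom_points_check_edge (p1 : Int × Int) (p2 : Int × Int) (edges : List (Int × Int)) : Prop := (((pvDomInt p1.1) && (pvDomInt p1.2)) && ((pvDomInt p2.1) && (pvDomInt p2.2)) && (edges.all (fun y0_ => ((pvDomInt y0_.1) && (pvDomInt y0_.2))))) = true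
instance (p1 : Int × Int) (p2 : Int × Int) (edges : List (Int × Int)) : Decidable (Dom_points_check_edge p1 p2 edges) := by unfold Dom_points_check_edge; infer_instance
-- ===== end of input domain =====

-- B replaces A's two toggling scans by one run-grouping pass plus two emissions (alternative decomposition, same cost).
-- Both versions are generators; the equivalence is about the list of yielded values.

-- ===== PORT A =====
-- helper: list(points_between(p1, p2))
def pointsBetween (p1 : Int × Int) (p2 : Int × Int) : List (Int × Int) :=
  (if p1.1 == p2.1 then
    (PySem.List.pyRange (min p1.2 p2.2) (max p1.2 p2.2 + 1) 1).map (fun i => (p1.1, i))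
  else [])
  ++
  (if p1.2 == p2.2 then
    (PySem.List.pyRange (min p1.1 p2.1) (max p1.1 p2.1 + 1) 1).map (fun i => (i, p1.2))
  else [])

-- A's toggling loop body: yields become conses, on_edge is the Bool state
def scanA (edges : List (Int × Int)) : Bool → List (Int × Int) → List (Int × Int)
  | _, [] => []
  | on, p :: ps =>
    if !(edges.contains p) && on then p :: scanA edges false ps
    else if edges.contains p && !on then scanA edges true ps
    else scanA edges on ps

def points_check_edge (p1 : Int × Int) (p2 : Int × Int) (edges : List (Int × Int)) : List (Int × Int) :=
  let points := pointsBetween p1 p2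
  -- points[::-1] is reverse (PySem.List.slice?_none_none_neg_one)
  scanA edges true points ++ scanA edges true points.reverse

-- ===== PORT B =====
-- B's grouping loop: collect (start, end) of each maximal non-edge run; cur is the open run
def runsB (edges : List (Int × Int)) : Option ((Int × Int) × (Int × Int)) → List (Int × Int) →
    List ((Int × Int) × (Int × Int))
  | cur, [] => match cur with
    | none => []
    | some r => [r]
  | cur, p :: ps =>
    if edges.contains p then
      match cur with
      | none => runsB edges none ps
      | some r => r :: runsB edges none ps
    else
      match cur with
      | none => runsB edges (some (p, p)) ps
      | some (s, _) => runsB edges (some (s, p)) ps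

def points_check_edge_alt (p1 : Int × Int) (p2 : Int × Int) (edges : List (Int × Int)) : List (Int × Int) :=
  let points :=
    (if p1.1 == p2.1 then
      (PySem.List.pyRange (min p1.2 p2.2) (max p1.2 p2.2 + 1) 1).map (fun i => (p1.1, i))
    else [])
    ++
    (if p1.2 == p2.2 then
      (PySem.List.pyRange (min p1.1 p2.1) (max p1.1 p2.1 + 1) 1).map (fun i => (i, p1.2))
    else [])
  let runs := runsB edges none points
  runs.map Prod.fst ++ runs.reverse.map Prod.snd

-- ===== PRECONDITION & SPEC =====
def Spec_points_check_edge (p1 : Int × Int) (p2 : Int × Int) (edges : List (Int × Int)) (out : List (Int × Int)) : Prop := out = points_check_edge_alt p1 p2 edges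
instance (p1 : Int × Int) (p2 : Int × Int) (edges : List (Int × Int)) (out : List (Int × Int)) : Decidable (Spec_points_check_edge p1 p2 edges out) := by unfold Spec_points_check_edge; infer_instance

-- ===== CLAIM (what is proved, stated in full; the proofs are below) =====
def Claim_equal_points_check_edge : Prop := ∀ (p1 : Int × Int) (p2 : Int × Int) (edges : List (Int × Int)), Dom_points_check_edge p1 p2 edges → Spec_points_check_edge p1 p2 edges (points_check_edge p1 p2 edges)

-- ===== LEMMAS AND PROOFS =====

-- run starts: map fst of the runs is exactly A's forward toggling scan
theorem runsB_map_fst (edges : List (Int × Int)) :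
    ∀ (ps : List (Int × Int)) (cur : Option ((Int × Int) × (Int × Int))),
      (runsB edges cur ps).map Prod.fst =
        (match cur with
         | none => scanA edges true ps
         | some (s, _) => s :: scanA edges false ps) := by
  intro ps
  induction ps with
  | nil =>
    intro cur
    rcases cur with _ | ⟨s, l⟩ <;> simp [runsB, scanA]
  | cons p t ih =>
    intro cur
    rcases cur with _ | ⟨s, l⟩
    · by_cases hc : p ∈ edges <;>
        simp [runsB, scanA, hc, ih none, ih (some (p, p))]
    · by_cases hc : p ∈ edges <;>
        simp [runsB, scanA, hc, ih none, ih (some (s, p))]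

-- A's on_edge state after a list: it only depends on the last element (edge or not)
def lastState (edges : List (Int × Int)) (on : Bool) (xs : List (Int × Int)) : Bool :=
  match xs.getLast? with
  | none => on
  | some q => edges.contains q

theorem lastState_cons (edges : List (Int × Int)) (on : Bool) (x : Int × Int) (xs : List (Int × Int)) :
    lastState edges on (x :: xs) = lastState edges (edges.contains x) xs := by
  cases xs with
  | nil => simp [lastState]
  | cons y t =>
    obtain ⟨q, hq⟩ : ∃ q, (y :: t).getLast? = some q := by
      cases e : (y :: t).getLast? with
      | none => simp at e
      | some q => exact ⟨q, rfl⟩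
    simp [lastState, List.getLast?_cons_cons, hq]

theorem scanA_append (edges : List (Int × Int)) :
    ∀ (xs ys : List (Int × Int)) (on : Bool),
      scanA edges on (xs ++ ys) = scanA edges on xs ++ scanA edges (lastState edges on xs) ys := by
  intro xs
  induction xs with
  | nil => intro ys on; simp [scanA, lastState]
  | cons x xs ih =>
    intro ys on
    rw [List.cons_append]
    by_cases hc : x ∈ edges <;> cases on <;>
      simp [scanA, hc, lastState_cons, ih]

theorem lastState_reverse (edges : List (Int × Int)) (t : List (Int × Int)) :
    lastState edges true t.reverse = t.head?.elim true (edges.contains ·) := by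
  cases t <;> simp [lastState]

theorem scanA_single (edges : List (Int × Int)) (s : Bool) (p : Int × Int) :
    scanA edges s [p] = if (!(edges.contains p) && s) = true then [p] else [] := by
  cases s <;> by_cases hc : p ∈ edges <;> simp [scanA, hc]

-- backward scan of points ++ [p]: p is yielded last iff it ends a non-edge run
theorem revEnds_cons (edges : List (Int × Int)) (p : Int × Int) (t : List (Int × Int)) :
    (scanA edges true (t.reverse ++ [p])).reverse =
      (if (!(edges.contains p) && t.head?.elim true (edges.contains ·)) = true then [p] else []) ++
        (scanA edges true t.reverse).reverse := by
  rw [scanA_append, lastState_reverse, scanA_single]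
  split <;> simp

-- run ends (reversed): map snd of the runs, reversed, is A's backward scan
theorem runsB_map_snd (edges : List (Int × Int)) :
    ∀ (ps : List (Int × Int)) (cur : Option ((Int × Int) × (Int × Int))),
      (runsB edges cur ps).map Prod.snd =
        (match cur with
         | none => (scanA edges true ps.reverse).reverse
         | some (_, l) =>
           (if ps.head?.elim true (edges.contains ·) then [l] else []) ++
             (scanA edges true ps.reverse).reverse) := by
  intro ps
  induction ps with
  | nil =>
    intro cur
    rcases cur with _ | ⟨s, l⟩ <;> simp [runsB, scanA]
  | cons p t ih =>
    intro cur
    rcases cur with _ | ⟨s, l⟩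
    · by_cases hc : p ∈ edges <;>
        simp [runsB, hc, ih none, ih (some (p, p)), revEnds_cons, Option.elim]
    · by_cases hc : p ∈ edges <;>
        simp [runsB, hc, ih none, ih (some (s, p)), revEnds_cons, Option.elim]

-- ===== VERDICT (by name: the statement is the Claim_ definition above) =====
theorem points_check_edge_spec : Claim_equal_points_check_edge := by
  intro p1 p2 edges _
  unfold Spec_points_check_edge points_check_edge points_check_edge_alt
  dsimp only
  rw [runsB_map_fst, List.map_reverse, runsB_map_snd]
  simp [pointsBetween]
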